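-- pv_equiv track=rewrite | github.com/sghoregooteitehoo03/AlgorithmStudy | 구현/기출문제/Q_10(못품).py | move_key
-- ===== SOURCE A (Python) =====
-- def move_key(index_list, list_len, str, holes):
--     move_dict = {
--         'U':[-1, 0],
--         'D':[1, 0],
--         'L':[0, -1],
--         'R':[0, 1]
--     }
--     count = 0
--     move_list = [[1] * list_len for _ in range(list_len)]
--     move_i, move_j = move_dict[str]
--
--     for index in index_list:
--         current_i, current_j = index
--         sum_i = move_i + current_i
--         sum_j = move_j + current_j
--
--         if ((sum_i >= 0 and sum_i < list_len) and (sum_j >= 0 and sum_j < list_len)):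
--             move_list[sum_i][sum_j] = 0
--             count += 1
--
--     if count >= holes:
--         return move_list
--     else:
--         return [[]]
-- ===== SOURCE B (Python) =====
-- def move_key(index_list, list_len, str, holes):
--     move_dict = {
--         'U': (-1, 0),
--         'D': (1, 0),
--         'L': (0, -1),
--         'R': (0, 1)
--     }
--     mi, mj = move_dict[str]
--     # multiplicity of each raw index cell (built once)
--     multiplicity = {}
--     for p in index_list:
--         multiplicity[p] = multiplicity.get(p, 0) + 1
--     # traverse the grid, looking backwards through the inverse shift
--     count = 0
--     move_list = []
--     for i in range(list_len):
--         row = []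
--         for j in range(list_len):
--             m = multiplicity.get((i - mi, j - mj), 0)
--             count += m
--             row.append(0 if m else 1)
--         move_list.append(row)
--     return move_list if count >= holes else [[]]
-- ===== Notes on version B (the rewrite author's own statement) =====
-- stated objective: alternative
-- what changed: B inverts the traversal: instead of A's pass over the points that shifts each one and mutates a pre-filled grid while counting, B builds a multiplicity dict of the raw indices once and then walks the grid itself, looking each cell's inverse-shifted preimage up in the dict to emit 0/1 and to accumulate the count.
import Mathlib
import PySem

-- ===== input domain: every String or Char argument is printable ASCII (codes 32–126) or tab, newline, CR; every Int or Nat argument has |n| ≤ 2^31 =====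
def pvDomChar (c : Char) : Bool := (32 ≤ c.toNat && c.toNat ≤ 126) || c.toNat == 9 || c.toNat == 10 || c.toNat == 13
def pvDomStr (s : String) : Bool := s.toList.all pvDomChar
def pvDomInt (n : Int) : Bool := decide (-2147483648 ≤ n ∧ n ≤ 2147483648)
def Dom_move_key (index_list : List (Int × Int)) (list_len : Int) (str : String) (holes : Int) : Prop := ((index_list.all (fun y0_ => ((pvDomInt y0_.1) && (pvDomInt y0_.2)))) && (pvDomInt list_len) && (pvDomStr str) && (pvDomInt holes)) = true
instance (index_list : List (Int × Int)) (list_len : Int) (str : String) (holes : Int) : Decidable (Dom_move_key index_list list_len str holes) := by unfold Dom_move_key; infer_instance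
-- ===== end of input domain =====

-- B reverses the traversal: a multiplicity dict of the raw indices, then a walk over the grid
-- looking up each cell's inverse-shifted preimage (alternative decomposition, same cost).


-- ===== PORT A =====
-- the body of A's for-loop: checked in-bounds write move_list[sum_i][sum_j] = 0 (indices are
-- guaranteed 0 ≤ · < list_len by the if, so .toNat indexing is exact) and count += 1
def mkStep (list_len move_i move_j : Int) (st : List (List Int) × Int) (index : Int × Int) :
    List (List Int) × Int :=
  let sum_i := move_i + index.1
  let sum_j := move_j + index.2
  if (0 ≤ sum_i ∧ sum_i < list_len) ∧ (0 ≤ sum_j ∧ sum_j < list_len) then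
    (st.1.modify sum_i.toNat (fun row => row.set sum_j.toNat 0), st.2 + 1)
  else st

def move_key (index_list : List (Int × Int)) (list_len : Int) (str : String) (holes : Int) : List (List Int) :=
  let move_dict : PySem.Dict String (Int × Int) :=
    PySem.Dict.ofList [("U", (-1, 0)), ("D", (1, 0)), ("L", (0, -1)), ("R", (0, 1))]
  -- move_dict[str]: KeyError (none) is excluded by Pre_move_key
  let mv := (move_dict.get? str).getD (0, 0)
  -- [[1] * list_len for _ in range(list_len)] (negative list_len gives [])
  let init : List (List Int) × Int :=
    (List.replicate list_len.toNat (List.replicate list_len.toNat 1), 0)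
  let res := index_list.foldl (mkStep list_len mv.1 mv.2) init
  if res.2 ≥ holes then res.1 else [[]]

-- ===== PORT B =====
def move_key_alt (index_list : List (Int × Int)) (list_len : Int) (str : String) (holes : Int) : List (List Int) :=
  let move_dict : PySem.Dict String (Int × Int) :=
    PySem.Dict.ofList [("U", (-1, 0)), ("D", (1, 0)), ("L", (0, -1)), ("R", (0, 1))]
  -- move_dict[str]: KeyError (none) is excluded by Pre_move_key
  let mv := (move_dict.get? str).getD (0, 0)
  -- multiplicity[p] = multiplicity.get(p, 0) + 1 over index_list
  let multiplicity : PySem.Dict (Int × Int) Int :=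
    index_list.foldl (fun d p => d.insert p (d.getD p 0 + 1)) PySem.Dict.empty
  -- grid walk with inverse-shift lookups, accumulating (move_list, count)
  let res : List (List Int) × Int :=
    (List.range list_len.toNat).foldl (fun st (i : Nat) =>
      let rc : List Int × Int :=
        (List.range list_len.toNat).foldl (fun st2 (j : Nat) =>
          let m := multiplicity.getD ((i : Int) - mv.1, (j : Int) - mv.2) 0
          (st2.1 ++ [if m ≠ 0 then 0 else 1], st2.2 + m)) ([], st.2)
      (st.1 ++ [rc.1], rc.2)) ([], 0)
  if res.2 ≥ holes then res.1 else [[]]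

-- ===== PRECONDITION & SPEC =====
-- Pre_ excludes exactly the direction strings outside {'U','D','L','R'}, on which A (and B) raise KeyError.
def Pre_move_key (index_list : List (Int × Int)) (list_len : Int) (str : String) (holes : Int) : Prop :=
  str = "U" ∨ str = "D" ∨ str = "L" ∨ str = "R"
instance (index_list : List (Int × Int)) (list_len : Int) (str : String) (holes : Int) : Decidable (Pre_move_key index_list list_len str holes) := by unfold Pre_move_key; infer_instance

def pvWitness_move_key : (List (Int × Int)) × Int × String × Int := ([(0, 0), (1, 1)], 2, "R", 1)

def Spec_move_key (index_list : List (Int × Int)) (list_len : Int) (str : String) (holes : Int) (out : List (List Int)) : Prop := out = move_key_alt index_list list_len str holes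
instance (index_list : List (Int × Int)) (list_len : Int) (str : String) (holes : Int) (out : List (List Int)) : Decidable (Spec_move_key index_list list_len str holes out) := by unfold Spec_move_key; infer_instance

-- ===== CLAIM (what is proved, stated in full; the proofs are below) =====
def Claim_equal_move_key : Prop := ∀ (index_list : List (Int × Int)) (list_len : Int) (str : String) (holes : Int), Dom_move_key index_list list_len str holes → Pre_move_key index_list list_len str holes → Spec_move_key index_list list_len str holes (move_key index_list list_len str holes)

-- ===== LEMMAS AND PROOFS =====

-- the in-bounds shifted targets, with multiplicity (proof-side characterisation of A's loop)
def bTargets (list_len move_i move_j : Int) (index_list : List (Int × Int)) : List (Int × Int) :=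
  index_list.filterMap (fun p =>
    if (0 ≤ move_i + p.1 ∧ move_i + p.1 < list_len) ∧ (0 ≤ move_j + p.2 ∧ move_j + p.2 < list_len)
    then some (move_i + p.1, move_j + p.2) else none)

-- proof-side gadget: one write of A's loop, as a function of the target cell
def paint (g : List (List Int)) (t : Int × Int) : List (List Int) :=
  g.modify t.1.toNat (fun row => row.set t.2.toNat 0)

-- A's counter ends at (number of in-bounds targets, with multiplicity)
lemma fold_snd (L mi mj : Int) (xs : List (Int × Int)) :
    ∀ (g : List (List Int)) (c : Int),
      (xs.foldl (mkStep L mi mj) (g, c)).2 = c + ((bTargets L mi mj xs).length : Int) := by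
  induction xs with
  | nil => intro g c; simp [bTargets]
  | cons x xs ih =>
    intro g c
    simp only [List.foldl_cons, bTargets, List.filterMap_cons, mkStep]
    split
    · rw [ih]; simp [bTargets]; omega
    · rw [ih]; rfl

-- A's final grid is the targets painted, in order, onto the initial grid
lemma fold_fst (L mi mj : Int) (xs : List (Int × Int)) :
    ∀ (g : List (List Int)) (c : Int),
      (xs.foldl (mkStep L mi mj) (g, c)).1 = (bTargets L mi mj xs).foldl paint g := by
  induction xs with
  | nil => intro g c; simp [bTargets]
  | cons x xs ih =>
    intro g c
    simp only [List.foldl_cons, bTargets, List.filterMap_cons, mkStep]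
    split
    · rw [ih]; simp only [bTargets, List.foldl_cons, paint]
    · rw [ih]; rfl

lemma bTargets_nonneg (L mi mj : Int) (xs : List (Int × Int)) :
    ∀ t ∈ bTargets L mi mj xs, 0 ≤ t.1 ∧ 0 ≤ t.2 := by
  intro t ht
  simp only [bTargets, List.mem_filterMap] at ht
  obtain ⟨p, _, hp⟩ := ht
  split at hp
  · cases hp; constructor <;> omega
  · cases hp

lemma map_range_modify {α : Type} (n : Nat) (F : Nat → α) (k : Nat) (g : α → α) :
    ((List.range n).map F).modify k g = (List.range n).map (fun i => if i = k then g (F i) else F i) := by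
  apply List.ext_getElem
  · simp
  · intro i h1 h2
    simp only [List.getElem_modify, List.getElem_map, List.getElem_range]
    by_cases h : i = k
    · simp [h]
    · simp [h, Ne.symm h]

lemma map_range_set {α : Type} (n : Nat) (F : Nat → α) (k : Nat) (a : α) :
    ((List.range n).map F).set k a = (List.range n).map (fun i => if i = k then a else F i) := by
  apply List.ext_getElem
  · simp
  · intro i h1 h2
    simp only [List.getElem_set, List.getElem_map, List.getElem_range]
    by_cases h : i = k
    · simp [h]
    · simp [h, Ne.symm h]

-- painting a comprehension-style grid with nonnegative targets gives the membership grid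
lemma paint_map (n : Nat) (ts : List (Int × Int)) :
    (∀ t ∈ ts, 0 ≤ t.1 ∧ 0 ≤ t.2) →
    ∀ (f : Nat → Nat → Int),
      ts.foldl paint ((List.range n).map (fun i => (List.range n).map (fun j => f i j)))
        = (List.range n).map (fun (i : Nat) => (List.range n).map (fun (j : Nat) =>
            if ((i : Int), (j : Int)) ∈ ts then 0 else f i j)) := by
  induction ts with
  | nil => intro _ f; simp
  | cons t ts ih =>
    intro hb f
    obtain ⟨ht1, ht2⟩ := hb t (List.mem_cons_self ..)
    have hrest : ∀ t' ∈ ts, 0 ≤ t'.1 ∧ 0 ≤ t'.2 := fun t' h => hb t' (List.mem_cons_of_mem _ h)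
    simp only [List.foldl_cons]
    have hpaint : paint ((List.range n).map (fun i => (List.range n).map (fun j => f i j))) t
        = (List.range n).map (fun i => (List.range n).map (fun j =>
            if i = t.1.toNat ∧ j = t.2.toNat then 0 else f i j)) := by
      rw [paint, map_range_modify]
      apply List.ext_getElem
      · simp
      · intro i h1 h2
        simp only [List.getElem_map, List.getElem_range]
        by_cases h : i = t.1.toNat
        · simp only [h, map_range_set]
          apply List.ext_getElem
          · simp
          · intro j h3 h4
            simp
        · simp [h]
    rw [hpaint, ih hrest]
    apply List.ext_getElem
    · simp
    · intro i h1 h2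
      simp only [List.getElem_map, List.getElem_range]
      apply List.ext_getElem
      · simp
      · intro j h3 h4
        simp only [List.getElem_map, List.getElem_range, List.mem_cons]
        by_cases hm : ((i : Int), (j : Int)) ∈ ts
        · simp [hm]
        · have : (((i : Int), (j : Int)) = t) ↔ (i = t.1.toNat ∧ j = t.2.toNat) := by
            cases t with
            | mk a b =>
              simp only [Prod.mk.injEq]
              constructor
              · rintro ⟨h1', h2'⟩; omega
              · rintro ⟨h1', h2'⟩; omega
          simp [hm, this]

-- B's grid walk, unfolded: outer state = (rows so far, count so far)
lemma b_outer (n : Nat) (m : Nat → Nat → Int) (v : Nat → Nat → Int) :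
    (List.range n).foldl (fun (st : List (List Int) × Int) i =>
        (st.1 ++ [((List.range n).foldl (fun (st2 : List Int × Int) j =>
            (st2.1 ++ [v i j], st2.2 + m i j)) ([], st.2)).1],
         ((List.range n).foldl (fun (st2 : List Int × Int) j =>
            (st2.1 ++ [v i j], st2.2 + m i j)) ([], st.2)).2)) ([], 0)
      = ((List.range n).map (fun i => (List.range n).map (v i)),
         ((List.range n).map (fun i => ((List.range n).map (m i)).sum)).sum) := by
  have hin : ∀ (i : Nat) (c : Int),
      (List.range n).foldl (fun (st2 : List Int × Int) j =>
          (st2.1 ++ [v i j], st2.2 + m i j)) ([], c)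
        = ((List.range n).map (v i), c + ((List.range n).map (m i)).sum) := by
    intro i c
    rw [PySem.List.foldl_prod_mk (f := fun acc j => acc ++ [v i j]) (g := fun acc j => acc + m i j)]
    rw [PySem.List.foldl_append_singleton_eq_map, PySem.List.foldl_add]
    simp
  have hstep : (fun (st : List (List Int) × Int) i =>
        (st.1 ++ [((List.range n).foldl (fun (st2 : List Int × Int) j =>
            (st2.1 ++ [v i j], st2.2 + m i j)) ([], st.2)).1],
         ((List.range n).foldl (fun (st2 : List Int × Int) j =>
            (st2.1 ++ [v i j], st2.2 + m i j)) ([], st.2)).2))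
      = fun (st : List (List Int) × Int) i =>
        (st.1 ++ [(List.range n).map (v i)], st.2 + ((List.range n).map (m i)).sum) := by
    funext st i; simp only [hin]
  rw [hstep]
  rw [PySem.List.foldl_prod_mk (f := fun acc i => acc ++ [(List.range n).map (v i)])
       (g := fun acc i => acc + ((List.range n).map (m i)).sum)]
  rw [PySem.List.foldl_append_singleton_eq_map, PySem.List.foldl_add]
  simp

-- single-row indicator sum
lemma sum_indicator (n : Nat) (a : Int) (K : Int) :
    (((List.range n).map (fun (i : Nat) => if ((i : Int) = a) then K else 0)).sum)
      = if 0 ≤ a ∧ a < (n : Int) then K else 0 := by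
  induction n with
  | zero =>
    have : ¬ (0 ≤ a ∧ a < ((0 : Nat) : Int)) := by omega
    simp [this]
  | succ n ih =>
    rw [List.range_succ, List.map_append, List.sum_append]
    simp only [List.map_cons, List.map_nil, List.sum_cons, List.sum_nil, ih]
    by_cases h : (n : Int) = a
    · have h1 : ¬ (0 ≤ a ∧ a < (n : Int)) := by omega
      have h2 : 0 ≤ a ∧ a < ((n + 1 : Nat) : Int) := by omega
      simp [h, h2]
    · have h3 : (0 ≤ a ∧ a < (n : Int)) ↔ (0 ≤ a ∧ a < ((n + 1 : Nat) : Int)) := by omega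
      simp [h, h3]

-- double indicator sum over the grid hits exactly the (single) in-bounds target cell
lemma sum_indicator2 (n : Nat) (a b : Int) :
    (((List.range n).map (fun (i : Nat) =>
        (((List.range n).map (fun (j : Nat) =>
            if ((i : Int) = a ∧ (j : Int) = b) then (1 : Int) else 0)).sum))).sum)
      = if (0 ≤ a ∧ a < (n : Int)) ∧ (0 ≤ b ∧ b < (n : Int)) then 1 else 0 := by
  have hrow : ∀ i : Nat, (((List.range n).map (fun (j : Nat) =>
      if ((i : Int) = a ∧ (j : Int) = b) then (1 : Int) else 0)).sum)
        = if (i : Int) = a then (if 0 ≤ b ∧ b < (n : Int) then (1 : Int) else 0) else 0 := by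
    intro i
    by_cases h : (i : Int) = a
    · rw [if_pos h]
      have : (fun (j : Nat) => if ((i : Int) = a ∧ (j : Int) = b) then (1 : Int) else 0)
          = fun (j : Nat) => if ((j : Int) = b) then (1 : Int) else 0 := by
        funext j; simp [h]
      rw [this, sum_indicator]
    · simp [h]
  simp only [hrow]
  rw [sum_indicator]
  by_cases ha : 0 ≤ a ∧ a < (n : Int)
  · simp [ha]
  · simp [ha]

-- B's count (sum of preimage multiplicities over the grid) = A's count (length of bTargets)
lemma count_eq (L mi mj : Int) (xs : List (Int × Int)) :
    (((List.range L.toNat).map (fun (i : Nat) =>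
        (((List.range L.toNat).map (fun (j : Nat) =>
            (xs.count ((i : Int) - mi, (j : Int) - mj) : Int))).sum))).sum)
      = ((bTargets L mi mj xs).length : Int) := by
  induction xs with
  | nil => simp [bTargets]
  | cons x xs ih =>
    have hcnt : ∀ q : Int × Int, ((x :: xs).count q : Int)
        = (xs.count q : Int) + (if q = x then 1 else 0) := by
      intro q
      rw [List.count_cons]
      by_cases h : q = x
      · simp [h]
      · simp [h, Ne.symm h]
    simp only [hcnt]
    have hsplit : ∀ i : Nat,
        (((List.range L.toNat).map (fun (j : Nat) =>
            (xs.count ((i : Int) - mi, (j : Int) - mj) : Int)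
              + (if ((i : Int) - mi, (j : Int) - mj) = x then 1 else 0))).sum)
          = (((List.range L.toNat).map (fun (j : Nat) =>
              (xs.count ((i : Int) - mi, (j : Int) - mj) : Int))).sum)
            + (((List.range L.toNat).map (fun (j : Nat) =>
                if ((i : Int) = mi + x.1 ∧ (j : Int) = mj + x.2) then (1 : Int) else 0)).sum) := by
      intro i
      rw [← List.sum_map_add]
      apply congrArg
      apply List.map_congr_left
      intro j _
      congr 1
      have : (((i : Int) - mi, (j : Int) - mj) = x) ↔ ((i : Int) = mi + x.1 ∧ (j : Int) = mj + x.2) := by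
        cases x with
        | mk a b => simp only [Prod.mk.injEq]; omega
      simp [this]
    simp only [hsplit]
    rw [List.sum_map_add]
    rw [ih, sum_indicator2]
    simp only [bTargets, List.filterMap_cons]
    by_cases hx : (0 ≤ mi + x.1 ∧ mi + x.1 < L) ∧ (0 ≤ mj + x.2 ∧ mj + x.2 < L)
    · have hx' : (0 ≤ mi + x.1 ∧ mi + x.1 < (L.toNat : Int)) ∧ (0 ≤ mj + x.2 ∧ mj + x.2 < (L.toNat : Int)) := by
        omega
      simp only [if_pos hx, if_pos hx', List.length_cons]
      push_cast; ring
    · have hx' : ¬ ((0 ≤ mi + x.1 ∧ mi + x.1 < (L.toNat : Int)) ∧ (0 ≤ mj + x.2 ∧ mj + x.2 < (L.toNat : Int))) := by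
        omega
      simp only [if_neg hx, if_neg hx', bTargets]
      ring

-- cell correspondence: preimage membership ↔ shifted-target membership (inside the grid)
lemma cell_iff (L mi mj : Int) (xs : List (Int × Int)) (i j : Nat)
    (hi : i < L.toNat) (hj : j < L.toNat) :
    (((i : Int) - mi, (j : Int) - mj) ∈ xs) ↔ (((i : Int), (j : Int)) ∈ bTargets L mi mj xs) := by
  constructor
  · intro h
    simp only [bTargets, List.mem_filterMap]
    refine ⟨((i : Int) - mi, (j : Int) - mj), h, ?_⟩
    have hiL : (i : Int) < L := by omega
    have hjL : (j : Int) < L := by omega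
    have hc : (0 ≤ mi + ((i : Int) - mi) ∧ mi + ((i : Int) - mi) < L)
        ∧ (0 ≤ mj + ((j : Int) - mj) ∧ mj + ((j : Int) - mj) < L) := by
      constructor <;> constructor <;> omega
    rw [if_pos hc]
    have e1 : mi + ((i : Int) - mi) = (i : Int) := by omega
    have e2 : mj + ((j : Int) - mj) = (j : Int) := by omega
    rw [e1, e2]
  · intro h
    simp only [bTargets, List.mem_filterMap] at h
    obtain ⟨p, hp, heq⟩ := h
    split at heq
    · have hinj := Option.some.inj heq
      have h1 : mi + p.1 = (i : Int) := congrArg Prod.fst hinj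
      have h2 : mj + p.2 = (j : Int) := congrArg Prod.snd hinj
      have : p = ((i : Int) - mi, (j : Int) - mj) := by
        cases p with | mk a b =>
          simp only [Prod.mk.injEq]
          constructor <;> omega
      rw [← this]; exact hp
    · exact absurd heq (by simp)

-- per-cell value: A's membership test = B's nonzero-multiplicity test
lemma cell_val (L mi mj : Int) (xs : List (Int × Int)) (i j : Nat)
    (hi : i < L.toNat) (hj : j < L.toNat) :
    (if (((i : Int), (j : Int)) ∈ bTargets L mi mj xs) then (0 : Int) else 1)
      = if ((xs.count ((i : Int) - mi, (j : Int) - mj) : Int) ≠ 0) then (0 : Int) else 1 := by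
  have hiff := cell_iff L mi mj xs i j hi hj
  by_cases hm : ((i : Int), (j : Int)) ∈ bTargets L mi mj xs
  · have hc : ((xs.count ((i : Int) - mi, (j : Int) - mj) : Int)) ≠ 0 := by
      have := List.count_pos_iff.mpr (hiff.mpr hm)
      omega
    rw [if_pos hm, if_pos hc]
  · have hc : ((xs.count ((i : Int) - mi, (j : Int) - mj) : Int)) = 0 := by
      have hn : ¬ (((i : Int) - mi, (j : Int) - mj) ∈ xs) := fun h => hm (hiff.mp h)
      simpa using List.count_eq_zero.mpr hn
    rw [if_neg hm, if_neg (by omega : ¬ ((xs.count ((i : Int) - mi, (j : Int) - mj) : Int) ≠ 0))]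

-- ===== VERDICT (by name: the statement is the Claim_ definition above) =====
theorem move_key_spec : Claim_equal_move_key := by
  intro index_list list_len str holes _ _
  unfold Spec_move_key move_key move_key_alt
  simp only []
  rw [PySem.Dict.foldl_insert_getD_add_one_eq_counter]
  rw [fold_snd, fold_fst, b_outer]
  simp only [PySem.Dict.getD_counter]
  have hinit : List.replicate list_len.toNat (List.replicate list_len.toNat (1 : Int))
      = (List.range list_len.toNat).map (fun i => (List.range list_len.toNat).map (fun j => (1 : Int))) := by
    simp [List.map_const']
  rw [hinit, paint_map _ _ (bTargets_nonneg _ _ _ _), count_eq]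
  simp only [zero_add]
  congr 1
  apply List.map_congr_left
  intro i hi
  apply List.map_congr_left
  intro j hj
  exact cell_val _ _ _ _ i j (List.mem_range.mp hi) (List.mem_range.mp hj)
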